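-- pv_equiv track=rewrite | github.com/alpro1000/STAVAGENT | concrete-agent/packages/core-backend/scripts/pi_0/extractors/xlsx_dvere.py | _detect_objekty
-- ===== SOURCE A (Python) =====
-- OBJEKT_PREFIXES = {
--     "A": ("A.", "S.A."),
--     "B": ("B.", "S.B."),
--     "C": ("C.", "S.C."),
--     "D": ("D.", "S.D."),
-- }
--
-- def _detect_objekty(from_room: str | None, to_room: str | None) -> set[str]:
--     """Which objekt(s) does this door belong to? Either side counts."""
--     found: set[str] = set()
--     for room in (from_room or "", to_room or ""):
--         room = str(room).strip()
--         if not room: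
--             continue
--         for objekt, prefixes in OBJEKT_PREFIXES.items():
--             if any(room.startswith(p) for p in prefixes):
--                 found.add(objekt)
--                 break
--     return found
-- ===== SOURCE B (Python) =====
-- def _detect_objekty(from_room, to_room):
--     """Which objekt(s) does this door belong to? Either side counts."""
--     found = set()
--     for room in (from_room, to_room):
--         room = (room or "").strip()
--         if room.startswith("S."):
--             room = room[2:]
--         if room[:1] in ("A", "B", "C", "D") and room[1:2] == ".":
--             found.add(room[:1])
--     return found
-- ===== Notes on version B (the rewrite author's own statement) =====
-- stated objective: simpler
-- what changed: B drops the OBJEKT_PREFIXES table and the nested any/startswith scan entirely: it strips one optional 'S.' prefix and then reads the object letter directly off the first two characters via slicing.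
import Mathlib
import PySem

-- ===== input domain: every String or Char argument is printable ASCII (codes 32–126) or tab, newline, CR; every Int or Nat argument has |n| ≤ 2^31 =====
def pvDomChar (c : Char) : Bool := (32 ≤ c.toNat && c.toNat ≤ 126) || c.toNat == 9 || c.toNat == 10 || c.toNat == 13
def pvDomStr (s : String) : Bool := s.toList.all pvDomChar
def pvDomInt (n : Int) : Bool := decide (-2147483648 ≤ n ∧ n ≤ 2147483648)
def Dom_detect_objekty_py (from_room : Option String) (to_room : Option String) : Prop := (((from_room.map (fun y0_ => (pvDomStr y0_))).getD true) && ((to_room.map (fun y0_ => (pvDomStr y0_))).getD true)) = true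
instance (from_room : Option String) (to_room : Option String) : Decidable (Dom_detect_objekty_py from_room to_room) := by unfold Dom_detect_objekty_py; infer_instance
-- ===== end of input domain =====

-- B replaces A's OBJEKT_PREFIXES table and nested any/startswith scan by stripping one
-- optional "S." prefix and parsing the object letter directly off the head of the string (simpler).

-- ===== PORT A =====
def pvObjektPrefixes : List (String × List String) :=
  [("A", ["A.", "S.A."]), ("B", ["B.", "S.B."]), ("C", ["C.", "S.C."]), ("D", ["D.", "S.D."])]

-- one iteration of A's outer loop: strip, skip if empty, scan the prefix table, break at first match
def pvStepA (found : PySem.Set String) (room : String) : PySem.Set String :=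
  let r := PySem.Str.strip room
  if r = "" then found
  else
    match pvObjektPrefixes.find? (fun op => op.2.any (fun p => PySem.Str.startswith r p)) with
    | some op => PySem.Set.add found op.1
    | none => found

def detect_objekty_py (from_room : Option String) (to_room : Option String) : List String :=
  [from_room.getD "", to_room.getD ""].foldl pvStepA PySem.Set.empty

-- ===== PORT B =====
-- one iteration of B's loop: strip, drop one leading "S.", read the letter off the head by slicing
def pvStepB (found : PySem.Set String) (room : Option String) : PySem.Set String :=
  let r := PySem.Str.strip (room.getD "")
  let r := if PySem.Str.startswith r "S." then PySem.Str.slice r (some 2) none else r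
  if PySem.Str.slice r none (some 1) ∈ ["A", "B", "C", "D"] ∧ PySem.Str.slice r (some 1) (some 2) = "." then
    PySem.Set.add found (PySem.Str.slice r none (some 1))
  else found

def detect_objekty_py_alt (from_room : Option String) (to_room : Option String) : List String :=
  [from_room, to_room].foldl pvStepB PySem.Set.empty

-- ===== PRECONDITION & SPEC =====
def Spec_detect_objekty_py (from_room : Option String) (to_room : Option String) (out : List String) : Prop := out = detect_objekty_py_alt from_room to_room
instance (from_room : Option String) (to_room : Option String) (out : List String) : Decidable (Spec_detect_objekty_py from_room to_room out) := by unfold Spec_detect_objekty_py; infer_instance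

-- ===== CLAIM (what is proved, stated in full; the proofs are below) =====
def Claim_equal_detect_objekty_py : Prop := ∀ (from_room : Option String) (to_room : Option String), Dom_detect_objekty_py from_room to_room → Spec_detect_objekty_py from_room to_room (detect_objekty_py from_room to_room)

-- ===== LEMMAS AND PROOFS =====

theorem pvStrEq (x y : String) : (x = y) ↔ x.toList = y.toList :=
  ⟨fun h => by rw [h], fun h => by have := congrArg String.ofList h; simpa using this⟩

theorem pvOfListEq (cs : List Char) (y : String) : (String.ofList cs = y) ↔ cs = y.toList :=
  ⟨fun h => by rw [← h]; simp, fun h => by have := congrArg String.ofList h; simpa using this⟩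

theorem pvSliceHead (cs : List Char) :
    PySem.Str.slice (String.ofList cs) none (some 1) = String.ofList (cs.take 1) := by
  rw [pvStrEq, PySem.Str.toList_slice, PySem.Chars.slice_eq_listSlice,
    show ((1:Int)) = ((1:Nat):Int) from rfl, PySem.List.slice_to_natCast]
  simp

theorem pvSliceSecond (cs : List Char) :
    PySem.Str.slice (String.ofList cs) (some 1) (some 2) = String.ofList ((cs.drop 1).take 1) := by
  rw [pvStrEq, PySem.Str.toList_slice, PySem.Chars.slice_eq_listSlice,
    show ((1:Int)) = ((1:Nat):Int) from rfl, show ((2:Int)) = ((2:Nat):Int) from rfl,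
    PySem.List.slice_natCast]
  simp

theorem pvSliceDrop2 (cs : List Char) :
    PySem.Str.slice (String.ofList cs) (some 2) none = String.ofList (cs.drop 2) := by
  rw [pvStrEq, PySem.Str.toList_slice, PySem.Chars.slice_eq_listSlice,
    show ((2:Int)) = ((2:Nat):Int) from rfl, PySem.List.slice_from_natCast]
  simp
theorem pvTLA : "A.".toList = ['A', '.'] := rfl
theorem pvTLB : "B.".toList = ['B', '.'] := rfl
theorem pvTLC : "C.".toList = ['C', '.'] := rfl
theorem pvTLD : "D.".toList = ['D', '.'] := rfl
theorem pvTLSA : "S.A.".toList = ['S', '.', 'A', '.'] := rfl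
theorem pvTLSB : "S.B.".toList = ['S', '.', 'B', '.'] := rfl
theorem pvTLSC : "S.C.".toList = ['S', '.', 'C', '.'] := rfl
theorem pvTLSD : "S.D.".toList = ['S', '.', 'D', '.'] := rfl
theorem pvTLS : "S.".toList = ['S', '.'] := rfl

theorem pvCore (f : PySem.Set String) (s : String) :
    (if s = "" then f
     else match pvObjektPrefixes.find? (fun op => op.2.any (fun p => PySem.Str.startswith s p)) with
       | some op => PySem.Set.add f op.1
       | none => f)
    = (let r := if PySem.Str.startswith s "S." then PySem.Str.slice s (some 2) none else s;
       if PySem.Str.slice r none (some 1) ∈ (["A", "B", "C", "D"] : List String) ∧ PySem.Str.slice r (some 1) (some 2) = "." then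
         PySem.Set.add f (PySem.Str.slice r none (some 1))
       else f) := by
  rw [show s = String.ofList s.toList from by simp]
  generalize s.toList = cs
  match cs with
  | [] =>
    simp [pvTLA, pvObjektPrefixes, PySem.Chars.startswith, List.isPrefixOf]
    intro h
    exact absurd h (by decide)
  | [c] =>
    simp [pvTLA, pvTLB, pvTLC, pvTLD, pvTLSA, pvTLSB, pvTLSC, pvTLSD, pvTLS, pvObjektPrefixes, PySem.Chars.startswith, List.isPrefixOf, beq_iff_eq, pvSliceHead, pvSliceSecond, pvSliceDrop2, pvOfListEq]
  | c :: d :: rest =>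
    by_cases hd : d = '.'
    · subst hd
      by_cases hcS : c = 'S'
      · subst hcS
        match rest with
        | [] =>
          simp [pvTLA, pvTLB, pvTLC, pvTLD, pvTLSA, pvTLSB, pvTLSC, pvTLSD, pvTLS, pvObjektPrefixes, PySem.Chars.startswith, List.isPrefixOf, beq_iff_eq, pvSliceHead, pvSliceSecond, pvSliceDrop2, pvOfListEq]
          exact fun h2 => absurd h2 (by decide)
        | [e] =>
          simp [pvTLA, pvTLB, pvTLC, pvTLD, pvTLSA, pvTLSB, pvTLSC, pvTLSD, pvTLS, pvObjektPrefixes, PySem.Chars.startswith, List.isPrefixOf, beq_iff_eq, pvSliceHead, pvSliceSecond, pvSliceDrop2, pvOfListEq]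
        | e :: e2 :: t =>
          by_cases he2 : e2 = '.'
          · subst he2
            by_cases heA : e = 'A'
            · subst heA; simp [pvTLA, pvTLB, pvTLC, pvTLD, pvTLSA, pvTLSB, pvTLSC, pvTLSD, pvTLS, pvObjektPrefixes, PySem.Chars.startswith, List.isPrefixOf, beq_iff_eq, pvSliceHead, pvSliceSecond, pvSliceDrop2, pvOfListEq]
            · by_cases heB : e = 'B'
              · subst heB; simp [pvTLA, pvTLB, pvTLC, pvTLD, pvTLSA, pvTLSB, pvTLSC, pvTLSD, pvTLS, pvObjektPrefixes, PySem.Chars.startswith, List.isPrefixOf, beq_iff_eq, pvSliceHead, pvSliceSecond, pvSliceDrop2, pvOfListEq]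
              · by_cases heC : e = 'C'
                · subst heC; simp [pvTLA, pvTLB, pvTLC, pvTLD, pvTLSA, pvTLSB, pvTLSC, pvTLSD, pvTLS, pvObjektPrefixes, PySem.Chars.startswith, List.isPrefixOf, beq_iff_eq, pvSliceHead, pvSliceSecond, pvSliceDrop2, pvOfListEq]
                · by_cases heD : e = 'D'
                  · subst heD; simp [pvTLA, pvTLB, pvTLC, pvTLD, pvTLSA, pvTLSB, pvTLSC, pvTLSD, pvTLS, pvObjektPrefixes, PySem.Chars.startswith, List.isPrefixOf, beq_iff_eq, pvSliceHead, pvSliceSecond, pvSliceDrop2, pvOfListEq]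
                  · simp [pvTLA, pvTLB, pvTLC, pvTLD, pvTLSA, pvTLSB, pvTLSC, pvTLSD, pvTLS, pvObjektPrefixes, PySem.Chars.startswith, List.isPrefixOf, beq_iff_eq, pvSliceHead, pvSliceSecond, pvSliceDrop2, pvOfListEq, heA, heB, heC, heD, Ne.symm heA, Ne.symm heB, Ne.symm heC, Ne.symm heD]
          · simp [pvTLA, pvTLB, pvTLC, pvTLD, pvTLSA, pvTLSB, pvTLSC, pvTLSD, pvTLS, pvObjektPrefixes, PySem.Chars.startswith, List.isPrefixOf, beq_iff_eq, pvSliceHead, pvSliceSecond, pvSliceDrop2, pvOfListEq, he2, Ne.symm he2]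
      · by_cases hcA : c = 'A'
        · subst hcA; simp [pvTLA, pvTLB, pvTLC, pvTLD, pvTLSA, pvTLSB, pvTLSC, pvTLSD, pvTLS, pvObjektPrefixes, PySem.Chars.startswith, List.isPrefixOf, beq_iff_eq, pvSliceHead, pvSliceSecond, pvSliceDrop2, pvOfListEq]
        · by_cases hcB : c = 'B'
          · subst hcB; simp [pvTLA, pvTLB, pvTLC, pvTLD, pvTLSA, pvTLSB, pvTLSC, pvTLSD, pvTLS, pvObjektPrefixes, PySem.Chars.startswith, List.isPrefixOf, beq_iff_eq, pvSliceHead, pvSliceSecond, pvSliceDrop2, pvOfListEq]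
          · by_cases hcC : c = 'C'
            · subst hcC; simp [pvTLA, pvTLB, pvTLC, pvTLD, pvTLSA, pvTLSB, pvTLSC, pvTLSD, pvTLS, pvObjektPrefixes, PySem.Chars.startswith, List.isPrefixOf, beq_iff_eq, pvSliceHead, pvSliceSecond, pvSliceDrop2, pvOfListEq]
            · by_cases hcD : c = 'D'
              · subst hcD; simp [pvTLA, pvTLB, pvTLC, pvTLD, pvTLSA, pvTLSB, pvTLSC, pvTLSD, pvTLS, pvObjektPrefixes, PySem.Chars.startswith, List.isPrefixOf, beq_iff_eq, pvSliceHead, pvSliceSecond, pvSliceDrop2, pvOfListEq]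
              · simp [pvTLA, pvTLB, pvTLC, pvTLD, pvTLSA, pvTLSB, pvTLSC, pvTLSD, pvTLS, pvObjektPrefixes, PySem.Chars.startswith, List.isPrefixOf, beq_iff_eq, pvSliceHead, pvSliceSecond, pvSliceDrop2, pvOfListEq, hcA, hcB, hcC, hcD, hcS, Ne.symm hcA, Ne.symm hcB, Ne.symm hcC, Ne.symm hcD, Ne.symm hcS]
    · simp [pvTLA, pvTLB, pvTLC, pvTLD, pvTLSA, pvTLSB, pvTLSC, pvTLSD, pvTLS, pvObjektPrefixes, PySem.Chars.startswith, List.isPrefixOf, beq_iff_eq, pvSliceHead, pvSliceSecond, pvSliceDrop2, pvOfListEq, hd, Ne.symm hd]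

-- the two per-room steps agree on every room
theorem pvStep_eq (f : PySem.Set String) (room : Option String) :
    pvStepA f (room.getD "") = pvStepB f room := by
  unfold pvStepA pvStepB
  exact pvCore f (PySem.Str.strip (room.getD ""))

-- ===== VERDICT (by name: the statement is the Claim_ definition above) =====
theorem detect_objekty_py_spec : Claim_equal_detect_objekty_py := by
  intro fr tr _
  unfold Spec_detect_objekty_py detect_objekty_py detect_objekty_py_alt
  simp only [List.foldl, pvStep_eq]
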